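-- pv_equiv track=rewrite | github.com/fisicoedu/fisicoedu.github.io | editor_trips.py | _parse_ssh_agent_output
-- ===== SOURCE A (Python) =====
-- def _parse_ssh_agent_output(agent_out: str) -> dict:
--     """Parse `ssh-agent -s` output and return env vars."""
--     env_vars: dict[str, str] = {}
--     # Typical lines:
--     # SSH_AUTH_SOCK=/var/folders/.../agent.12345; export SSH_AUTH_SOCK;
--     # SSH_AGENT_PID=12345; export SSH_AGENT_PID;
--     for line in agent_out.splitlines():
--         line = line.strip()
--         if line.startswith("SSH_AUTH_SOCK="):
--             val = line.split("SSH_AUTH_SOCK=", 1)[1].split(";", 1)[0]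
--             if val:
--                 env_vars["SSH_AUTH_SOCK"] = val
--         elif line.startswith("SSH_AGENT_PID="):
--             val = line.split("SSH_AGENT_PID=", 1)[1].split(";", 1)[0]
--             if val:
--                 env_vars["SSH_AGENT_PID"] = val
--     return env_vars
-- ===== SOURCE B (Python) =====
-- def _parse_ssh_agent_output(agent_out: str) -> dict:
--     """Parse `ssh-agent -s` output and return env vars."""
--     # Pass 1: generic table of every 'KEY=value;...' assignment line.
--     raw: dict[str, str] = {}
--     for line in agent_out.splitlines():
--         line = line.strip()
--         if "=" in line:
--             key, rest = line.split("=", 1)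
--             val = rest.split(";", 1)[0]
--             if val:
--                 raw[key] = val
--     # Pass 2: project onto the two variables of interest.
--     wanted = ("SSH_AUTH_SOCK", "SSH_AGENT_PID")
--     return {k: v for k, v in raw.items() if k in wanted}
-- ===== Notes on version B (the rewrite author's own statement) =====
-- stated objective: alternative
-- what changed: A's loop with two hardcoded variable-name prefix branches is replaced by a generic first pass that tables every assignment line into a raw dict (split once on the equals sign, value taken before the first semicolon, empty values skipped) followed by a second pass (a dict comprehension) that projects the raw table onto the two wanted variables.
import Mathlib
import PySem

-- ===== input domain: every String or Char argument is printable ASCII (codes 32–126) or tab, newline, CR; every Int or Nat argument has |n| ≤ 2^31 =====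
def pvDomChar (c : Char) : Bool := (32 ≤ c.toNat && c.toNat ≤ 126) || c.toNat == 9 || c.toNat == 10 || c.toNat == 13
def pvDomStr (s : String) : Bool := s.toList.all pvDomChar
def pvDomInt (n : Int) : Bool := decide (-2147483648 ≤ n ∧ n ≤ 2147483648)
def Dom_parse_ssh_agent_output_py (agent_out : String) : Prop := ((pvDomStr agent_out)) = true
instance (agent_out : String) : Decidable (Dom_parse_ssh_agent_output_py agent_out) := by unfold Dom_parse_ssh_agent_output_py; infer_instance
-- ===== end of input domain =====

-- B replaces A's two hardcoded prefix branches by a generic first pass that tables every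
-- 'KEY=value;…' line and a second pass (a dict comprehension) that projects onto the two
-- wanted variables (objective: alternative decomposition, same cost).

-- ===== PORT A =====
-- loop body of A: strip the line, then try the two hardcoded prefixes in order.
-- (The Python list indexings [1] / [0] are total here: under the startswith guard
-- split(sep, 1) has two pieces and split(";", 1) is never empty, so .getD is exact.)
def pvLineA (env_vars : PySem.Dict String String) (line0 : String) : PySem.Dict String String :=
  let line := PySem.Str.strip line0
  if PySem.Str.startswith line "SSH_AUTH_SOCK=" then
    let val := (((PySem.Str.splitMax? line "SSH_AUTH_SOCK=" 1).getD []).getD 1 "")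
    let val := (((PySem.Str.splitMax? val ";" 1).getD []).getD 0 "")
    if val ≠ "" then env_vars.insert "SSH_AUTH_SOCK" val else env_vars
  else if PySem.Str.startswith line "SSH_AGENT_PID=" then
    let val := (((PySem.Str.splitMax? line "SSH_AGENT_PID=" 1).getD []).getD 1 "")
    let val := (((PySem.Str.splitMax? val ";" 1).getD []).getD 0 "")
    if val ≠ "" then env_vars.insert "SSH_AGENT_PID" val else env_vars
  else env_vars

def parse_ssh_agent_output_py (agent_out : String) : List (String × String) :=
  ((PySem.Str.splitlines agent_out).foldl pvLineA PySem.Dict.empty).items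

-- ===== PORT B =====
-- pass-1 loop body of B: strip, and table ANY 'key=…' line (value before the first ';',
-- empty values skipped).  ([0] / [1] are total: under the '=' in line guard
-- split('=', 1) has exactly two pieces, so .getD is exact.)
def pvLineB (raw : PySem.Dict String String) (line0 : String) : PySem.Dict String String :=
  let line := PySem.Str.strip line0
  if PySem.Str.isIn "=" line then
    let parts := (PySem.Str.splitMax? line "=" 1).getD []
    let key := parts.getD 0 ""
    let rest := parts.getD 1 ""
    let val := (((PySem.Str.splitMax? rest ";" 1).getD []).getD 0 "")
    if val ≠ "" then raw.insert key val else raw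
  else raw

-- 'k in wanted' of B's dict comprehension
def pvWantedB (k : String) : Bool := k == "SSH_AUTH_SOCK" || k == "SSH_AGENT_PID"

def parse_ssh_agent_output_py_alt (agent_out : String) : List (String × String) :=
  let raw := (PySem.Str.splitlines agent_out).foldl pvLineB PySem.Dict.empty
  (raw.items.foldl
      (fun acc p => if pvWantedB p.1 then acc.insert p.1 p.2 else acc)
      (PySem.Dict.empty : PySem.Dict String String)).items

-- ===== PRECONDITION & SPEC =====
def Spec_parse_ssh_agent_output_py (agent_out : String) (out : List (String × String)) : Prop := out = parse_ssh_agent_output_py_alt agent_out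
instance (agent_out : String) (out : List (String × String)) : Decidable (Spec_parse_ssh_agent_output_py agent_out out) := by unfold Spec_parse_ssh_agent_output_py; infer_instance

-- ===== CLAIM (what is proved, stated in full; the proofs are below) =====
def Claim_equal_parse_ssh_agent_output_py : Prop := ∀ (agent_out : String), Dom_parse_ssh_agent_output_py agent_out → Spec_parse_ssh_agent_output_py agent_out (parse_ssh_agent_output_py agent_out)

-- ===== LEMMAS AND PROOFS =====

-- the key filter: keep exactly the wanted entries of B's raw table
def pvP (p : String × String) : Bool := pvWantedB p.1

def pvF (raw : PySem.Dict String String) : PySem.Dict String String :=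
  PySem.Dict.mk (raw.items.filter pvP)

-- specification of split(sep, 1): the pieces around the FIRST occurrence of sep, if any
def pvSplitOnce (sep : List Char) : List Char → Option (List Char × List Char)
  | [] => if sep.isPrefixOf [] then some ([], ([] : List Char).drop sep.length) else none
  | c :: rest =>
    if sep.isPrefixOf (c :: rest) then some ([], (c :: rest).drop sep.length)
    else (pvSplitOnce sep rest).map (fun p => (c :: p.1, p.2))

-- value of a raw line: the part of the right-hand side before the first ';'
def pvB0 (b : List Char) : List Char :=
  match pvSplitOnce [';'] b with
  | some (v1, _) => v1
  | none => b

-- what one stripped line contributes: key and value, if it is an assignment line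
def pvParse (s : String) : Option (String × String) :=
  match pvSplitOnce ['='] s.toList with
  | none => none
  | some (a, b) => some (String.ofList a, String.ofList (pvB0 b))


theorem pv_go0 (sep : List Char) (fuel : Nat) (l cur : List Char) (acc : List (List Char)) :
    PySem.Chars.splitOnMax.go sep fuel 0 l cur acc = ((cur.reverse ++ l) :: acc).reverse := by
  cases fuel <;> cases l <;> simp [PySem.Chars.splitOnMax.go]

theorem pv_go1 (sep : List Char) (l : List Char) (fuel : Nat) (cur : List Char)
    (acc : List (List Char)) (hsep : sep ≠ []) (hl : l.length < fuel) :
    PySem.Chars.splitOnMax.go sep fuel 1 l cur acc =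
      (match pvSplitOnce sep l with
        | some (a, b) => acc.reverse ++ [cur.reverse ++ a, b]
        | none => acc.reverse ++ [cur.reverse ++ l]) := by
  induction l generalizing fuel cur acc with
  | nil =>
    cases fuel with
    | zero => omega
    | succ n =>
      have hp : sep.isPrefixOf ([] : List Char) = false := by
        cases sep with
        | nil => exact absurd rfl hsep
        | cons a t => rfl
      simp [PySem.Chars.splitOnMax.go, pvSplitOnce, hp]
  | cons c rest ih =>
    cases fuel with
    | zero => omega
    | succ n =>
      by_cases hp : sep.isPrefixOf (c :: rest)
      · simp only [PySem.Chars.splitOnMax.go, hp, if_true, if_neg (one_ne_zero)]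
        rw [pv_go0]
        simp [pvSplitOnce, hp]
      · simp only [PySem.Chars.splitOnMax.go, hp, if_neg (one_ne_zero)]
        rw [ih n (c :: cur) acc (by simpa using Nat.lt_of_succ_lt_succ hl)]
        simp [pvSplitOnce, hp]
        cases h : pvSplitOnce sep rest with
        | none => simp
        | some p => cases p; simp

theorem pv_split1 (s sep : List Char) (hsep : sep ≠ []) :
    PySem.Chars.splitOnMax s sep 1 =
      (match pvSplitOnce sep s with
        | some (a, b) => [a, b]
        | none => [s]) := by
  unfold PySem.Chars.splitOnMax
  rw [if_neg (by norm_num)]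
  have : (1 : Int).toNat = 1 := rfl
  rw [this, pv_go1 sep s (s.length + 1) [] [] hsep (Nat.lt_succ_self _)]
  cases h : pvSplitOnce sep s with
  | none => simp
  | some p => cases p; simp

theorem pv_splitOnce_prefix (sep s : List Char) (h : sep.isPrefixOf s) :
    pvSplitOnce sep s = some ([], s.drop sep.length) := by
  cases s <;> simp [pvSplitOnce, h]

theorem pv_splitOnce_some (c : Char) (s a b : List Char)
    (h : pvSplitOnce [c] s = some (a, b)) : s = a ++ c :: b ∧ c ∉ a := by
  induction s generalizing a b with
  | nil => simp [pvSplitOnce] at h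
  | cons x rest ih =>
    by_cases hp : [c].isPrefixOf (x :: rest)
    · have hx : x = c := by
        cases List.isPrefixOf_iff_prefix.mp hp with
        | intro t ht => exact (List.cons.injEq _ _ _ _).mp ht |>.1.symm
      simp [pvSplitOnce, hp] at h
      obtain ⟨ha, hb⟩ := h
      subst ha hb hx
      simp
    · have hpf : [c].isPrefixOf (x :: rest) = false := Bool.eq_false_iff.mpr hp
      simp only [pvSplitOnce, hpf, Bool.false_eq_true, if_false, Option.map_eq_some_iff] at h
      obtain ⟨⟨a', b'⟩, hq, heq⟩ := h
      cases heq
      obtain ⟨h1, h2⟩ := ih _ _ hq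
      have hxc : x ≠ c := by
        intro hx; subst hx
        exact hp (by simp)
      subst h1
      refine ⟨rfl, ?_⟩
      simp only [List.mem_cons, not_or]
      exact ⟨fun hh => hxc hh.symm, h2⟩

theorem pv_splitOnce_intro (c : Char) (a b : List Char) (h : c ∉ a) :
    pvSplitOnce [c] (a ++ c :: b) = some (a, b) := by
  induction a with
  | nil =>
    have hp : [c].isPrefixOf (c :: b) = true := by
      rw [List.isPrefixOf]; simp
    unfold pvSplitOnce
    simp [hp]
  | cons x t ih =>
    have hx : x ≠ c := by intro hh; exact h (by simp [hh])
    have hp : [c].isPrefixOf (x :: (t ++ c :: b)) = false := by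
      rw [List.isPrefixOf]
      simp only [List.isPrefixOf_nil_left, Bool.and_true, beq_eq_false_iff_ne, ne_eq]
      exact fun hh => hx hh.symm
    simp only [List.cons_append, pvSplitOnce, hp, Bool.false_eq_true, if_false,
      ih (by intro hh; exact h (by simp [hh])), Option.map_some]

theorem pv_splitOnce_none (c : Char) (s : List Char)
    (h : pvSplitOnce [c] s = none) : c ∉ s := by
  induction s with
  | nil => simp
  | cons x rest ih =>
    by_cases hp : [c].isPrefixOf (x :: rest)
    · simp [pvSplitOnce, hp] at h
    · simp [pvSplitOnce, hp] at h
      have hxc : x ≠ c := by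
        intro hx; subst hx
        exact hp (by simp)
      simp only [List.mem_cons, not_or]
      exact ⟨fun hh => hxc hh.symm, ih h⟩

-- result of r.split(";", 1)[0]
theorem pv_semival (r : String) :
    (((PySem.Str.splitMax? r ";" 1).getD []).getD 0 "") = String.ofList (pvB0 r.toList) := by
  have h1 : (";".toList) = [';'] := rfl
  simp only [PySem.Str.splitMax?, PySem.Chars.splitMax?, h1]
  rw [if_neg (by decide), pv_split1 r.toList [';'] (by decide)]
  unfold pvB0
  cases h : pvSplitOnce [';'] r.toList with
  | none => simp
  | some p => cases p; simp

theorem pv_no_eq_not_prefix (cs pre : List Char) (h : '=' ∉ cs) (hpre : '=' ∈ pre) :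
    pre.isPrefixOf cs = false := by
  rw [Bool.eq_false_iff]
  intro hp
  obtain ⟨t, ht⟩ := List.isPrefixOf_iff_prefix.mp hp
  exact h (ht ▸ List.mem_append_left t hpre)

-- under pvSplitOnce ['='] s = some (a, b), 'K=' is a prefix of s exactly when a = K

theorem pv_prefix_forces (s a b K t : List Char) (hK : '=' ∉ K)
    (h : pvSplitOnce ['='] s = some (a, b)) (ht : (K ++ ['=']) ++ t = s) :
    a = K ∧ b = t := by
  have : pvSplitOnce ['='] s = some (K, t) := by
    rw [← ht, List.append_assoc]
    exact pv_splitOnce_intro '=' K t hK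
  rw [h] at this
  have := Option.some.inj this
  exact ⟨congrArg Prod.fst this, congrArg Prod.snd this⟩

-- the line function of B, characterized

-- the loop body of B, characterized through pvParse
def pvLineB' (raw : PySem.Dict String String) (line : String) : PySem.Dict String String :=
  match pvParse (PySem.Str.strip line) with
  | none => raw
  | some (k, v) => if v ≠ "" then raw.insert k v else raw

theorem pv_lineB_eq (raw : PySem.Dict String String) (line : String) :
    pvLineB raw line = pvLineB' raw line := by
  unfold pvLineB pvLineB' pvParse
  cases h : pvSplitOnce ['='] (PySem.Str.strip line).toList with
  | none =>
    have hni : '=' ∉ (PySem.Str.strip line).toList := pv_splitOnce_none _ _ h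
    have hIn : PySem.Str.isIn "=" (PySem.Str.strip line) = false := by
      rw [PySem.Str.isIn_eq]
      rw [PySem.Chars.isIn_eq_false_iff]
      intro hinf
      exact hni ((List.singleton_infix_iff '=' _).mp
        ((by rfl : ("=".toList : List Char) = ['=']) ▸ hinf))
    simp only [hIn, Bool.false_eq_true, if_false]
  | some ab =>
    obtain ⟨a, b⟩ := ab
    obtain ⟨hs1, hs2⟩ := pv_splitOnce_some '=' _ a b h
    have hIn : PySem.Str.isIn "=" (PySem.Str.strip line) = true := by
      rw [PySem.Str.isIn_eq, PySem.Chars.isIn_iff_infix,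
        (by rfl : ("=".toList : List Char) = ['=']), List.singleton_infix_iff, hs1]
      simp
    have hsplit : PySem.Str.splitMax? (PySem.Str.strip line) "=" 1
        = some [String.ofList a, String.ofList b] := by
      have h1 : ("=".toList) = ['='] := rfl
      simp only [PySem.Str.splitMax?, PySem.Chars.splitMax?, h1]
      rw [if_neg (by decide), pv_split1 _ ['='] (by decide), h]
      rfl
    simp only [hIn, if_true, hsplit, Option.getD_some]
    have hg0 : ([String.ofList a, String.ofList b].getD 0 "") = String.ofList a := rfl
    have hg1 : ([String.ofList a, String.ofList b].getD 1 "") = String.ofList b := rfl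
    rw [hg0, hg1, pv_semival (String.ofList b), String.toList_ofList]

-- the line function of A, characterized

-- the loop body of A, characterized through pvParse
def pvLineA' (d : PySem.Dict String String) (line : String) : PySem.Dict String String :=
  match pvParse (PySem.Str.strip line) with
  | none => d
  | some (k, v) => if pvWantedB k = true ∧ v ≠ "" then d.insert k v else d

theorem pv_lineA_eq (d : PySem.Dict String String) (line : String) :
    pvLineA d line = pvLineA' d line := by
  unfold pvLineA pvLineA' pvParse
  cases h : pvSplitOnce ['='] (PySem.Str.strip line).toList with
  | none =>
    have hni : '=' ∉ (PySem.Str.strip line).toList := pv_splitOnce_none _ _ h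
    have hsw1 : PySem.Str.startswith (PySem.Str.strip line) "SSH_AUTH_SOCK=" = false := by
      rw [PySem.Str.startswith_eq]
      exact pv_no_eq_not_prefix _ _ hni (by decide)
    have hsw2 : PySem.Str.startswith (PySem.Str.strip line) "SSH_AGENT_PID=" = false := by
      rw [PySem.Str.startswith_eq]
      exact pv_no_eq_not_prefix _ _ hni (by decide)
    simp only [hsw1, hsw2, Bool.false_eq_true, if_false]
  | some ab =>
    obtain ⟨a, b⟩ := ab
    obtain ⟨hs1, hs2⟩ := pv_splitOnce_some '=' _ a b h
    by_cases ha1 : a = "SSH_AUTH_SOCK".toList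
    · subst ha1
      have hpre : ("SSH_AUTH_SOCK=".toList).isPrefixOf (PySem.Str.strip line).toList = true := by
        rw [List.isPrefixOf_iff_prefix]
        exact ⟨b, by rw [hs1]; rfl⟩
      have hsw1 : PySem.Str.startswith (PySem.Str.strip line) "SSH_AUTH_SOCK=" = true := by
        rw [PySem.Str.startswith_eq]; exact hpre
      have hsplit : PySem.Str.splitMax? (PySem.Str.strip line) "SSH_AUTH_SOCK=" 1
          = some ["", String.ofList b] := by
        simp only [PySem.Str.splitMax?, PySem.Chars.splitMax?]
        rw [if_neg (by decide), pv_split1 _ _ (by decide),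
          pv_splitOnce_prefix _ _ hpre]
        have hdrop : (PySem.Str.strip line).toList.drop ("SSH_AUTH_SOCK=".toList).length
            = b := by
          rw [hs1]
          have : ("SSH_AUTH_SOCK".toList : List Char) ++ '=' :: b
              = "SSH_AUTH_SOCK=".toList ++ b := rfl
          rw [this, List.drop_left]
        rw [hdrop]
        rfl
      simp only [hsw1, if_true, hsplit, Option.getD_some]
      have hg1 : ((["", String.ofList b] : List String).getD 1 "") = String.ofList b := rfl
      rw [hg1, pv_semival (String.ofList b), String.toList_ofList]
      have hk : String.ofList ("SSH_AUTH_SOCK".toList) = "SSH_AUTH_SOCK" :=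
        String.ofList_toList
      rw [hk]
      have hw : pvWantedB "SSH_AUTH_SOCK" = true := rfl
      simp [hw]
    · have hsw1 : PySem.Str.startswith (PySem.Str.strip line) "SSH_AUTH_SOCK=" = false := by
        rw [PySem.Str.startswith_eq, Bool.eq_false_iff]
        intro hp
        obtain ⟨t, ht⟩ := List.isPrefixOf_iff_prefix.mp hp
        exact ha1 (pv_prefix_forces _ a b _ t (by decide) h ht).1
      by_cases ha2 : a = "SSH_AGENT_PID".toList
      · subst ha2
        have hpre : ("SSH_AGENT_PID=".toList).isPrefixOf (PySem.Str.strip line).toList = true := by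
          rw [List.isPrefixOf_iff_prefix]
          exact ⟨b, by rw [hs1]; rfl⟩
        have hsw2 : PySem.Str.startswith (PySem.Str.strip line) "SSH_AGENT_PID=" = true := by
          rw [PySem.Str.startswith_eq]; exact hpre
        have hsplit : PySem.Str.splitMax? (PySem.Str.strip line) "SSH_AGENT_PID=" 1
            = some ["", String.ofList b] := by
          simp only [PySem.Str.splitMax?, PySem.Chars.splitMax?]
          rw [if_neg (by decide), pv_split1 _ _ (by decide),
            pv_splitOnce_prefix _ _ hpre]
          have hdrop : (PySem.Str.strip line).toList.drop ("SSH_AGENT_PID=".toList).length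
              = b := by
            rw [hs1]
            have : ("SSH_AGENT_PID".toList : List Char) ++ '=' :: b
                = "SSH_AGENT_PID=".toList ++ b := rfl
            rw [this, List.drop_left]
          rw [hdrop]
          rfl
        simp only [hsw1, Bool.false_eq_true, if_false, hsw2, if_true, hsplit, Option.getD_some]
        have hg1 : ((["", String.ofList b] : List String).getD 1 "") = String.ofList b := rfl
        rw [hg1, pv_semival (String.ofList b), String.toList_ofList]
        have hk : String.ofList ("SSH_AGENT_PID".toList) = "SSH_AGENT_PID" :=
          String.ofList_toList
        rw [hk]
        have hw : pvWantedB "SSH_AGENT_PID" = true := rfl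
        simp [hw]
      · have hsw2 : PySem.Str.startswith (PySem.Str.strip line) "SSH_AGENT_PID=" = false := by
          rw [PySem.Str.startswith_eq, Bool.eq_false_iff]
          intro hp
          obtain ⟨t, ht⟩ := List.isPrefixOf_iff_prefix.mp hp
          exact ha2 (pv_prefix_forces _ a b _ t (by decide) h ht).1
        have hw : pvWantedB (String.ofList a) = false := by
          rw [Bool.eq_false_iff]
          intro hwt
          unfold pvWantedB at hwt
          rcases Bool.or_eq_true_iff.mp hwt with h' | h'
          · apply ha1
            have he : String.ofList a = "SSH_AUTH_SOCK" := by simpa using h'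
            rw [← he, String.toList_ofList]
          · apply ha2
            have he : String.ofList a = "SSH_AGENT_PID" := by simpa using h'
            rw [← he, String.toList_ofList]
        simp only [hsw1, hsw2, hw, Bool.false_eq_true, if_false, false_and]

theorem pv_map_filter (l : List (String × String)) (k v) :
    (l.map (fun p => if p.1 == k then (k, v) else p)).filter pvP
      = (l.filter pvP).map (fun p => if p.1 == k then (k, v) else p) := by
  induction l with
  | nil => rfl
  | cons p t ih =>
    obtain ⟨pk, pw⟩ := p
    by_cases hk : pk = k
    · subst hk
      by_cases hw : pvWantedB pk
      · simp [pvP, hw]; simpa using ih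
      · simp [pvP, Bool.eq_false_iff.mpr hw]; simpa using ih
    · by_cases hw : pvWantedB pk
      · simp [pvP, hw, hk]; simpa using ih
      · simp [pvP, Bool.eq_false_iff.mpr hw, hk]; simpa using ih

theorem pv_contains_filter (l : List (String × String)) (k : String)
    (hk : pvWantedB k = true) :
    (l.filter pvP).any (fun p => p.1 == k) = l.any (fun p => p.1 == k) := by
  induction l with
  | nil => rfl
  | cons p t ih =>
    by_cases hpk : p.1 == k
    · have hk' : p.1 = k := by simpa using hpk
      have hw : pvP p = true := by simp [pvP, hk', hk]
      simp [hw, hpk]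
    · by_cases hw : pvP p <;> simp [hw, hpk, ih]

theorem pv_filter_insert_true (d : PySem.Dict String String) (k v : String)
    (hk : pvWantedB k = true) :
    pvF (d.insert k v) = (pvF d).insert k v := by
  cases d with
  | mk l =>
    unfold PySem.Dict.insert PySem.Dict.contains pvF
    by_cases hc : l.any (fun p => p.1 == k)
    · simp only [hc, if_true, pv_contains_filter l k hk, pv_map_filter]
    · have hc' : (l.filter pvP).any (fun p => p.1 == k) = false := by
        rw [pv_contains_filter l k hk]; exact Bool.eq_false_iff.mpr hc
      have hPkv : pvP (k, v) = true := by simpa [pvP] using hk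
      simp [hc, hc', List.filter_append, hPkv]

theorem pv_map_filter_false (l : List (String × String)) (k v : String)
    (hk : pvWantedB k = false) :
    (l.map (fun p => if p.1 == k then (k, v) else p)).filter pvP = l.filter pvP := by
  induction l with
  | nil => rfl
  | cons p t ih =>
    obtain ⟨pk, pw⟩ := p
    by_cases he : pk = k
    · subst he
      simp [pvP, hk]; simpa using ih
    · by_cases hw : pvWantedB pk
      · simp [pvP, hw, he]; simpa using ih
      · simp [pvP, Bool.eq_false_iff.mpr hw, he]; simpa using ih

theorem pv_filter_insert_false (d : PySem.Dict String String) (k v : String)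
    (hk : pvWantedB k = false) :
    pvF (d.insert k v) = pvF d := by
  cases d with
  | mk l =>
    unfold PySem.Dict.insert PySem.Dict.contains pvF
    by_cases hc : l.any (fun p => p.1 == k)
    · simp only [hc, if_true, pv_map_filter_false l k v hk]
    · have hPkv : pvP (k, v) = false := by simpa [pvP] using hk
      simp [hc, List.filter_append, hPkv]

-- one line: A's step on the filtered table is the filter of B's step
theorem pv_step (raw : PySem.Dict String String) (line : String) :
    pvLineA (pvF raw) line = pvF (pvLineB raw line) := by
  rw [pv_lineA_eq, pv_lineB_eq]
  unfold pvLineA' pvLineB'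
  cases hp : pvParse (PySem.Str.strip line) with
  | none => rfl
  | some kv =>
    obtain ⟨k, v⟩ := kv
    dsimp only
    by_cases hv : v ≠ ""
    · by_cases hw : pvWantedB k
      · rw [if_pos ⟨hw, hv⟩, if_pos hv, pv_filter_insert_true raw k v hw]
      · rw [if_neg (fun hc => hw hc.1), if_pos hv,
          pv_filter_insert_false raw k v (Bool.eq_false_iff.mpr hw)]
    · rw [if_neg (fun hc => hv hc.2), if_neg hv]

theorem pv_loop (lines : List String) (raw : PySem.Dict String String) :
    lines.foldl pvLineA (pvF raw) = pvF (lines.foldl pvLineB raw) := by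
  induction lines generalizing raw with
  | nil => rfl
  | cons a t ih => simpa [List.foldl_cons, pv_step raw a] using ih (pvLineB raw a)

theorem pv_nodup_lineB (raw : PySem.Dict String String) (line : String)
    (h : raw.keys.Nodup) : ((pvLineB raw line).keys).Nodup := by
  unfold pvLineB
  dsimp only
  split_ifs <;> first | exact h | exact PySem.Dict.nodup_keys_insert _ _ _ h

theorem pv_nodup_loop (lines : List String) (raw : PySem.Dict String String)
    (h : raw.keys.Nodup) : ((lines.foldl pvLineB raw).keys).Nodup := by
  induction lines generalizing raw with
  | nil => exact h
  | cons a t ih => exact ih _ (pv_nodup_lineB raw a h)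

theorem pv_cond_fold (l : List (String × String)) (acc : PySem.Dict String String) :
    l.foldl (fun acc p => if pvWantedB p.1 then acc.insert p.1 p.2 else acc) acc
      = (l.filter pvP).foldl (fun acc p => acc.insert p.1 p.2) acc := by
  induction l generalizing acc with
  | nil => rfl
  | cons p t ih =>
    by_cases hw : pvWantedB p.1
    · simp [pvP, hw, ih]
    · simp [pvP, Bool.eq_false_iff.mpr hw, ih]

-- B's second pass (the dict comprehension) is exactly the key filter
theorem pv_comprehension (l : List (String × String)) (hnd : (l.map Prod.fst).Nodup) :
    (l.foldl (fun acc p => if pvWantedB p.1 then acc.insert p.1 p.2 else acc)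
        (PySem.Dict.empty : PySem.Dict String String)).items = l.filter pvP := by
  rw [pv_cond_fold]
  have hfresh : ∀ a ∈ l.filter pvP, (PySem.Dict.empty : PySem.Dict String String).contains a.1 = false := by
    intro a _; rfl
  have hsub : (l.filter pvP).Sublist l := List.filter_sublist
  have hnd' : ((l.filter pvP).map Prod.fst).Nodup :=
    List.Nodup.sublist (hsub.map Prod.fst) hnd
  have := PySem.Dict.items_foldl_insert_fresh (l := l.filter pvP)
      (k := Prod.fst) (v := Prod.snd) (d := PySem.Dict.empty) hfresh hnd'
  simpa using this

-- ===== VERDICT (by name: the statement is the Claim_ definition above) =====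
theorem parse_ssh_agent_output_py_spec : Claim_equal_parse_ssh_agent_output_py := by
  intro agent_out _
  unfold Spec_parse_ssh_agent_output_py parse_ssh_agent_output_py parse_ssh_agent_output_py_alt
  have hA : ((PySem.Str.splitlines agent_out).foldl pvLineA PySem.Dict.empty) =
      pvF ((PySem.Str.splitlines agent_out).foldl pvLineB PySem.Dict.empty) :=
    pv_loop (PySem.Str.splitlines agent_out) PySem.Dict.empty
  rw [hA]
  have hnd := pv_nodup_loop (PySem.Str.splitlines agent_out) PySem.Dict.empty (by simp [PySem.Dict.empty])
  rw [pv_comprehension _ (by simpa [PySem.Dict.keys] using hnd)]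
  rfl
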